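-- pv_equiv track=rewrite | github.com/BruceHi/leetcode | month1/countQuadruplets.py | countQuadruplets
-- ===== SOURCE A (Python) =====
-- from typing import List
-- from collections import Counter, defaultdict
--
-- def countQuadruplets(nums: List[int]) -> int:
--     n = len(nums)
--     res = 0
--     count = defaultdict(int)
--     for b in range(n-3, 0, -1):
--         for d in range(b+2, n):
--             count[nums[d]-nums[b+1]] += 1  # 统计灯饰右边的，b+1 即是统计 c
--         for a in range(b):
--             total = nums[a] + nums[b]
--             if total in count:
--                 res += count[total]
--     return res
-- ===== SOURCE B (Python) =====
-- from collections import Counter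
--
-- def countQuadruplets(nums):
--     # Direct O(n^3) count: sweep c from right to left keeping a Counter of the
--     # VALUES nums[d] for indices d already passed (d > c); for every pair a < b < c
--     # add the frequency of nums[a] + nums[b] + nums[c]; insert nums[c] only after c.
--     n = len(nums)
--     res = 0
--     cnt = Counter()
--     for c in range(n - 1, -1, -1):
--         for b in range(c):
--             for a in range(b):
--                 res += cnt[nums[a] + nums[b] + nums[c]]
--         cnt[nums[c]] += 1
--     return res
-- ===== Notes on version B (the rewrite author's own statement) =====
-- stated objective: simpler
-- what changed: A is the O(n^2) LeetCode trick that hashes accumulated differences nums[d]-nums[c] keyed by pair sums over two separate inner passes; B is the direct O(n^3) count with three nested index loops a<b<c and a Counter of the single values nums[d] already passed on the right, trading speed for obvious correctness.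
import Mathlib
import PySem

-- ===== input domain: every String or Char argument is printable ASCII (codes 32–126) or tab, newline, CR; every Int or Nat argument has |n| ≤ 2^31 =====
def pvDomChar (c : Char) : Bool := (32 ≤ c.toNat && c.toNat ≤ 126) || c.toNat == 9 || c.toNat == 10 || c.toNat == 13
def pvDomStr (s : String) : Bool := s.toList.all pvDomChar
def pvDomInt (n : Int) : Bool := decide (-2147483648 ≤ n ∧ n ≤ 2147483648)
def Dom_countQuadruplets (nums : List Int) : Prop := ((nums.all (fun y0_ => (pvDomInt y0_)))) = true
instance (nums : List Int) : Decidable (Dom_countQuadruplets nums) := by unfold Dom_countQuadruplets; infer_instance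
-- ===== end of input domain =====

-- B replaces A's O(n^2) hashmap of accumulated differences by the direct O(n^3) count:
-- three nested index loops a<b<c and a Counter of single values nums[d] seen to the right (simpler, not faster).

-- ===== PORT A =====
def countQuadruplets (nums : List Int) : Int :=
  let n : Int := PySem.List.len nums
  ((PySem.List.pyRange (n - 3) 0 (-1)).foldl
    (fun (st : Int × PySem.Dict Int Int) b =>
      let count := (PySem.List.pyRange (b + 2) n).foldl
        (fun d j => d.modify (PySem.List.pyGetD nums j 0 - PySem.List.pyGetD nums (b + 1) 0) 0 (· + 1)) st.2
      let res := (PySem.List.pyRange 0 b).foldl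
        (fun r a =>
          let total := PySem.List.pyGetD nums a 0 + PySem.List.pyGetD nums b 0
          if count.contains total then r + count.getD total 0 else r) st.1
      (res, count))
    (0, PySem.Dict.empty)).1

-- ===== PORT B =====
def countQuadruplets_alt (nums : List Int) : Int :=
  let n : Int := PySem.List.len nums
  ((PySem.List.pyRange (n - 1) (-1) (-1)).foldl
    (fun (st : Int × PySem.Dict Int Int) c =>
      let res := (PySem.List.pyRange 0 c).foldl
        (fun r b =>
          (PySem.List.pyRange 0 b).foldl
            (fun r a =>
              r + st.2.getD (PySem.List.pyGetD nums a 0 + PySem.List.pyGetD nums b 0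
                             + PySem.List.pyGetD nums c 0) 0) r) st.1
      (res, st.2.modify (PySem.List.pyGetD nums c 0) 0 (· + 1)))
    (0, PySem.Dict.empty)).1

-- ===== PRECONDITION & SPEC =====
def Spec_countQuadruplets (nums : List Int) (out : Int) : Prop := out = countQuadruplets_alt nums
instance (nums : List Int) (out : Int) : Decidable (Spec_countQuadruplets nums out) := by unfold Spec_countQuadruplets; infer_instance

-- ===== CLAIM (what is proved, stated in full; the proofs are below) =====
def Claim_equal_countQuadruplets : Prop := ∀ (nums : List Int), Dom_countQuadruplets nums → Spec_countQuadruplets nums (countQuadruplets nums)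

-- ===== LEMMAS AND PROOFS =====

-- element access by Nat index (out-of-range defaults to 0, never reached by the loops)
def qg (nums : List Int) (i : Nat) : Int := nums.getD i 0

-- number of indices d > c with nums[d] = nums[a] + nums[b] + nums[c]
def qcnt (nums : List Int) (a b c : Nat) : Int :=
  ((nums.drop (c + 1)).count (qg nums a + qg nums b + qg nums c) : Int)

-- keys A's inner d-loop inserts at iteration b
def keysA (nums : List Int) (b : Int) : List Int :=
  (PySem.List.pyRange (b + 2) (PySem.List.len nums)).map
    (fun j => PySem.List.pyGetD nums j 0 - PySem.List.pyGetD nums (b + 1) 0)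

def ksA (nums : List Int) : Nat → List Int
  | 0 => []
  | k + 1 => keysA nums ((k : Int) + 1) ++ ksA nums k

def sa (nums : List Int) : Nat → List Int → Int
  | 0, _ => 0
  | k + 1, P =>
    ((PySem.List.pyRange 0 ((k : Int) + 1)).map
      (fun a => ((P ++ keysA nums ((k : Int) + 1)).count
        (PySem.List.pyGetD nums a 0 + PySem.List.pyGetD nums ((k : Int) + 1) 0) : Int))).sum
    + sa nums k (P ++ keysA nums ((k : Int) + 1))

-- a Counter extended by a fold of `modify (f j) 0 (·+1)` is the Counter of the appended key list
lemma counter_fold_keys (js P : List Int) (f : Int → Int) :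
    js.foldl (fun d j => d.modify (f j) 0 (· + 1)) (PySem.Dict.counter P)
      = PySem.Dict.counter (P ++ js.map f) := by
  rw [PySem.Dict.counter_eq_foldl, PySem.Dict.counter_eq_foldl, List.foldl_append, List.foldl_map]

-- A's guarded lookup loop adds the multiplicities of the looked-up keys
lemma lookup_fold (l Q : List Int) (h : Int → Int) (r : Int) :
    l.foldl (fun r a =>
      if (PySem.Dict.counter Q).contains (h a) then r + (PySem.Dict.counter Q).getD (h a) 0 else r) r
      = r + (l.map (fun a => (Q.count (h a) : Int))).sum := by
  have hstep : (fun (r : Int) (a : Int) =>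
      if (PySem.Dict.counter Q).contains (h a) then r + (PySem.Dict.counter Q).getD (h a) 0 else r)
      = fun r a => r + (Q.count (h a) : Int) := by
    funext r a
    by_cases hc : (PySem.Dict.counter Q).contains (h a) = true
    · simp [hc, PySem.Dict.getD_counter]
    · have hm : h a ∉ Q := by
        rw [PySem.Dict.contains_counter] at hc
        simpa using hc
      simp [hc, List.count_eq_zero.mpr hm]
  rw [hstep, PySem.List.foldl_add]

lemma sum_map_range (k : Nat) (f : Nat → Int) :
    ((List.range k).map f).sum = ∑ a ∈ Finset.range k, f a := rfl

lemma keysA_count (nums : List Int) (j : Nat) (t : Int) :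
    (keysA nums (j : Int)).count t = (nums.drop (j + 2)).count (t + qg nums (j + 1)) := by
  unfold keysA
  have h1 : ((j:Int)+1) = ((j+1 : Nat) : Int) := by push_cast; ring
  rw [h1, PySem.List.pyGetD_natCast]
  have h2 : (fun (x:Int) => PySem.List.pyGetD nums x 0 - nums.getD (j+1) 0)
      = (fun y => y - nums.getD (j+1) 0) ∘ (fun x => PySem.List.pyGetD nums x 0) := rfl
  rw [h2, ← List.map_map]
  rw [PySem.List.map_pyGetD_pyRange nums 0 (by positivity)]
  have h3 : ((j:Int)+2).toNat = j + 2 := by omega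
  rw [h3]
  have h4 : t = (fun y => y - nums.getD (j+1) 0) (t + qg nums (j+1)) := by simp [qg]
  conv_lhs => rw [h4]
  rw [List.count_map_of_injective _ _ sub_left_injective]

-- loop invariant for port A's outer fold
lemma loopA (nums : List Int) : ∀ (k : Nat) (r : Int) (P : List Int),
    (PySem.List.pyRange (k : Int) 0 (-1)).foldl
      (fun (st : Int × PySem.Dict Int Int) b =>
        let count := (PySem.List.pyRange (b + 2) (PySem.List.len nums)).foldl
          (fun d j => d.modify (PySem.List.pyGetD nums j 0 - PySem.List.pyGetD nums (b + 1) 0) 0 (· + 1)) st.2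
        let res := (PySem.List.pyRange 0 b).foldl
          (fun r a =>
            let total := PySem.List.pyGetD nums a 0 + PySem.List.pyGetD nums b 0
            if count.contains total then r + count.getD total 0 else r) st.1
        (res, count))
      (r, PySem.Dict.counter P)
    = (r + sa nums k P, PySem.Dict.counter (P ++ ksA nums k)) := by
  intro k
  induction k with
  | zero =>
    intro r P
    rw [PySem.List.pyRange_neg_one_eq_nil (by norm_num)]
    simp [sa, ksA]
  | succ k ih =>
    intro r P
    have hc : ((k + 1 : Nat) : Int) = (k : Int) + 1 := by push_cast; ring
    rw [hc, PySem.List.pyRange_neg_one_cons (by positivity), List.foldl_cons]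
    simp only []
    rw [counter_fold_keys, lookup_fold]
    have ht : ((k : Int) + 1 - 1) = (k : Int) := by ring
    rw [ht, ih]
    have hK : keysA nums ((k : Int) + 1)
        = (PySem.List.pyRange ((k : Int) + 1 + 2) (PySem.List.len nums)).map
            (fun j => PySem.List.pyGetD nums j 0 - PySem.List.pyGetD nums ((k : Int) + 1 + 1) 0) := rfl
    rw [← hK]
    simp only [sa, ksA, add_assoc, List.append_assoc]

lemma sa_closed (nums : List Int) : ∀ (k : Nat) (P : List Int),
    sa nums k P
      = (∑ i ∈ Finset.range k, ∑ a ∈ Finset.range (i + 1), (P.count (qg nums a + qg nums (i + 1)) : Int))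
      + ∑ i ∈ Finset.range k, ∑ a ∈ Finset.range (i + 1), ∑ c ∈ Finset.Icc (i + 2) (k + 1), qcnt nums a (i + 1) c := by
  intro k
  induction k with
  | zero =>
    intro P
    simp [sa]
  | succ k ih =>
    intro P
    rw [sa, ih]
    have hcast : ((k:Int)+1) = ((k+1:Nat):Int) := by push_cast; ring
    rw [hcast]
    rw [PySem.List.pyRange_zero_natCast, List.map_map, Function.comp_def]
    rw [sum_map_range]
    have hT : ∀ a ∈ Finset.range (k+1),
        (((P ++ keysA nums ((k+1:Nat):Int)).count
          (PySem.List.pyGetD nums ((a:Nat):Int) 0 + PySem.List.pyGetD nums ((k+1:Nat):Int) 0)) : Int)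
        = (P.count (qg nums a + qg nums (k+1)) : Int) + qcnt nums a (k+1) (k+2) := by
      intro a _
      rw [PySem.List.pyGetD_natCast, PySem.List.pyGetD_natCast, List.count_append]
      push_cast
      rw [hcast, keysA_count]
      simp [qcnt, qg]
    rw [Finset.sum_congr rfl hT]
    have hP' : ∀ i ∈ Finset.range k,
        ∑ a ∈ Finset.range (i+1), (((P ++ keysA nums ((k+1:Nat):Int)).count (qg nums a + qg nums (i+1))) : Int)
        = ∑ a ∈ Finset.range (i+1), ((P.count (qg nums a + qg nums (i+1)) : Int) + qcnt nums a (i+1) (k+2)) := by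
      intro i _
      apply Finset.sum_congr rfl
      intro a _
      rw [List.count_append]
      push_cast
      rw [hcast, keysA_count]
      simp [qcnt, qg]
    rw [Finset.sum_congr rfl hP']
    rw [Finset.sum_range_succ (fun i => ∑ a ∈ Finset.range (i+1), (P.count (qg nums a + qg nums (i+1)) : Int)) k]
    rw [Finset.sum_range_succ (fun i => ∑ a ∈ Finset.range (i+1), ∑ c ∈ Finset.Icc (i+2) (k+1+1), qcnt nums a (i+1) c) k]
    have hI : ∀ i ∈ Finset.range k,
        ∑ a ∈ Finset.range (i+1), ∑ c ∈ Finset.Icc (i+2) (k+1+1), qcnt nums a (i+1) c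
        = ∑ a ∈ Finset.range (i+1), ((∑ c ∈ Finset.Icc (i+2) (k+1), qcnt nums a (i+1) c) + qcnt nums a (i+1) (k+2)) := by
      intro i hi
      have hi' := Finset.mem_range.mp hi
      apply Finset.sum_congr rfl
      intro a _
      exact Finset.sum_Icc_succ_top (a := i+2) (b := k+1) (by omega) _
    rw [Finset.sum_congr rfl hI]
    have hIcc : ∑ a ∈ Finset.range (k+1), ∑ c ∈ Finset.Icc (k+1+1) (k+1+1), qcnt nums a (k+1) c
        = ∑ a ∈ Finset.range (k+1), qcnt nums a (k+1) (k+2) := by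
      apply Finset.sum_congr rfl
      intro a _
      rw [Finset.Icc_self, Finset.sum_singleton]
    rw [hIcc]
    simp only [Finset.sum_add_distrib]
    ring

-- ===== B-side lemmas =====

-- B's innermost a-loop sums the Counter multiplicities of the triple sums
lemma innerB (nums Q : List Int) (b c : Nat) (r : Int) :
    (PySem.List.pyRange 0 (b : Int)).foldl
      (fun r a => r + (PySem.Dict.counter Q).getD
        (PySem.List.pyGetD nums a 0 + PySem.List.pyGetD nums (b : Int) 0
          + PySem.List.pyGetD nums (c : Int) 0) 0) r
    = r + ∑ a ∈ Finset.range b, (Q.count (qg nums a + qg nums b + qg nums c) : Int) := by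
  rw [PySem.List.pyRange_zero_natCast, List.foldl_map, PySem.List.foldl_add]
  congr 1
  rw [sum_map_range]
  apply Finset.sum_congr rfl
  intro a _
  simp [PySem.Dict.getD_counter, qg]

-- the b-loop over List.range m, with the index c of the outer sweep held fixed
lemma middleB_aux (nums Q : List Int) (c : Nat) : ∀ (m : Nat) (r : Int),
    (List.range m).foldl
      (fun r b =>
        (PySem.List.pyRange 0 ((b : Nat) : Int)).foldl
          (fun r a => r + (PySem.Dict.counter Q).getD
            (PySem.List.pyGetD nums a 0 + PySem.List.pyGetD nums ((b : Nat) : Int) 0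
              + PySem.List.pyGetD nums (c : Int) 0) 0) r) r
    = r + ∑ b ∈ Finset.range m, ∑ a ∈ Finset.range b, (Q.count (qg nums a + qg nums b + qg nums c) : Int) := by
  intro m
  induction m with
  | zero => intro r; simp
  | succ m ih =>
    intro r
    rw [List.range_succ, List.foldl_append, ih, List.foldl_cons, List.foldl_nil, innerB,
        Finset.sum_range_succ]
    ring

-- B's middle b-loop
lemma middleB (nums Q : List Int) (c : Nat) (r : Int) :
    (PySem.List.pyRange 0 (c : Int)).foldl
      (fun r b =>
        (PySem.List.pyRange 0 b).foldl
          (fun r a => r + (PySem.Dict.counter Q).getD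
            (PySem.List.pyGetD nums a 0 + PySem.List.pyGetD nums b 0
              + PySem.List.pyGetD nums (c : Int) 0) 0) r) r
    = r + ∑ b ∈ Finset.range c, ∑ a ∈ Finset.range b, (Q.count (qg nums a + qg nums b + qg nums c) : Int) := by
  rw [PySem.List.pyRange_zero_natCast, List.foldl_map]
  exact middleB_aux nums Q c c r

-- loop invariant for port B's descending fold over c
lemma loopB (nums : List Int) : ∀ (k : Nat), k ≤ nums.length → ∀ (r : Int),
    (PySem.List.pyRange ((k : Int) - 1) (-1) (-1)).foldl
      (fun (st : Int × PySem.Dict Int Int) c =>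
        let res := (PySem.List.pyRange 0 c).foldl
          (fun r b =>
            (PySem.List.pyRange 0 b).foldl
              (fun r a =>
                r + st.2.getD (PySem.List.pyGetD nums a 0 + PySem.List.pyGetD nums b 0
                               + PySem.List.pyGetD nums c 0) 0) r) st.1
        (res, st.2.modify (PySem.List.pyGetD nums c 0) 0 (· + 1)))
      (r, PySem.Dict.counter ((nums.drop k).reverse))
    = (r + ∑ c ∈ Finset.range k, ∑ b ∈ Finset.range c, ∑ a ∈ Finset.range b, qcnt nums a b c,
       PySem.Dict.counter nums.reverse) := by
  intro k
  induction k with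
  | zero =>
    intro _ r
    rw [PySem.List.pyRange_neg_one_eq_nil (by norm_num)]
    simp
  | succ k ih =>
    intro hk r
    have hc : ((k + 1 : Nat) : Int) - 1 = (k : Int) := by push_cast; ring
    rw [hc, PySem.List.pyRange_neg_one_cons (by omega), List.foldl_cons]
    rw [middleB nums ((nums.drop (k+1)).reverse) k r]
    have hkey : (PySem.Dict.counter ((nums.drop (k+1)).reverse)).modify
        (PySem.List.pyGetD nums (k : Int) 0) 0 (· + 1)
        = PySem.Dict.counter ((nums.drop k).reverse) := by
      have h1 := counter_fold_keys [PySem.List.pyGetD nums (k:Int) 0] ((nums.drop (k+1)).reverse) id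
      simp only [List.foldl_cons, List.foldl_nil, List.map_cons, List.map_nil, id] at h1
      rw [h1]
      congr 1
      have hlt : k < nums.length := by omega
      rw [List.drop_eq_getElem_cons hlt, List.reverse_cons]
      congr 1
      rw [PySem.List.pyGetD_natCast]
      simp [List.getD, hlt]
    rw [hkey]
    have ht : (k : Int) - 1 = ((k : Nat) : Int) - 1 := rfl
    rw [ht, ih (by omega)]
    have hterm : ∀ b ∈ Finset.range k, ∀ a ∈ Finset.range b,
        (((nums.drop (k+1)).reverse.count (qg nums a + qg nums b + qg nums k)) : Int)
        = qcnt nums a b k := by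
      intro b _ a _
      rw [List.count_reverse]
      rfl
    rw [Finset.sum_congr rfl (fun b hb => Finset.sum_congr rfl (hterm b hb))]
    rw [Finset.sum_range_succ (fun c => ∑ b ∈ Finset.range c, ∑ a ∈ Finset.range b, qcnt nums a b c) k]
    refine Prod.ext ?_ rfl
    show r + _ + _ = r + (_ + _)
    ring

-- triangle exchange of a double sum
lemma triangle (M : Nat) (F : Nat → Nat → Int) :
    ∑ b ∈ Finset.range M, ∑ c ∈ Finset.Icc (b + 1) M, F b c
      = ∑ c ∈ Finset.range (M + 1), ∑ b ∈ Finset.range c, F b c := by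
  induction M with
  | zero => simp
  | succ M ih =>
    rw [Finset.sum_range_succ]
    have h1 : ∀ b ∈ Finset.range M, ∑ c ∈ Finset.Icc (b+1) (M+1), F b c
        = (∑ c ∈ Finset.Icc (b+1) M, F b c) + F b (M+1) := by
      intro b hb
      have hb' := Finset.mem_range.mp hb
      exact Finset.sum_Icc_succ_top (a := b+1) (b := M) (by omega) _
    rw [Finset.sum_congr rfl h1, Finset.sum_add_distrib, ih]
    rw [Finset.Icc_self, Finset.sum_singleton]
    rw [Finset.sum_range_succ (fun c => ∑ b ∈ Finset.range c, F b c) (M+1)]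
    rw [Finset.sum_range_succ (fun b => F b (M+1)) M]
    ring

lemma a_eq (nums : List Int) :
    countQuadruplets nums = sa nums (nums.length - 3) [] := by
  unfold countQuadruplets
  simp only []
  by_cases h3 : 3 ≤ nums.length
  · have harg : PySem.List.len nums - 3 = ((nums.length - 3 : Nat) : Int) := by
      rw [PySem.List.len_eq]; omega
    rw [harg]
    rw [show ((0 : Int), (PySem.Dict.empty : PySem.Dict Int Int))
        = ((0 : Int), PySem.Dict.counter ([] : List Int)) from rfl]
    rw [loopA nums (nums.length - 3) 0 []]
    simp
  · have harg : PySem.List.len nums - 3 ≤ 0 := by rw [PySem.List.len_eq]; omega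
    rw [PySem.List.pyRange_neg_one_eq_nil harg]
    have h0 : nums.length - 3 = 0 := by omega
    rw [h0]
    simp [sa]

lemma b_eq (nums : List Int) :
    countQuadruplets_alt nums
      = ∑ c ∈ Finset.range nums.length, ∑ b ∈ Finset.range c, ∑ a ∈ Finset.range b, qcnt nums a b c := by
  unfold countQuadruplets_alt
  simp only []
  have harg : PySem.List.len nums - 1 = ((nums.length : Nat) : Int) - 1 := by
    rw [PySem.List.len_eq]
  rw [harg]
  rw [show ((0 : Int), (PySem.Dict.empty : PySem.Dict Int Int))
      = ((0 : Int), PySem.Dict.counter ((nums.drop nums.length).reverse)) from by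
    rw [List.drop_length]; rfl]
  rw [loopB nums nums.length (le_refl _) 0]
  simp

-- ===== VERDICT (by name: the statement is the Claim_ definition above) =====
theorem countQuadruplets_spec : Claim_equal_countQuadruplets := by
  intro nums _
  show countQuadruplets nums = countQuadruplets_alt nums
  rw [a_eq, b_eq, sa_closed]
  simp only [List.count_nil, Nat.cast_zero, Finset.sum_const_zero, zero_add]
  by_cases h3 : 3 ≤ nums.length
  · have e1 : nums.length - 3 + 1 = nums.length - 2 := by omega
    rw [e1]
    have e2 : ∑ b ∈ Finset.range (nums.length - 2),
        (fun b => ∑ a ∈ Finset.range b, ∑ c ∈ Finset.Icc (b + 1) (nums.length - 2), qcnt nums a b c) b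
        = (∑ i ∈ Finset.range (nums.length - 3),
            (fun b => ∑ a ∈ Finset.range b, ∑ c ∈ Finset.Icc (b + 1) (nums.length - 2), qcnt nums a b c) (i + 1))
          + (fun b => ∑ a ∈ Finset.range b, ∑ c ∈ Finset.Icc (b + 1) (nums.length - 2), qcnt nums a b c) 0 := by
      rw [← e1]
      exact Finset.sum_range_succ' _ (nums.length - 3)
    simp only [] at e2
    rw [show (∑ i ∈ Finset.range (nums.length - 3), ∑ a ∈ Finset.range (i + 1),
          ∑ c ∈ Finset.Icc (i + 1 + 1) (nums.length - 2), qcnt nums a (i + 1) c)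
        = ∑ b ∈ Finset.range (nums.length - 2), ∑ a ∈ Finset.range b,
          ∑ c ∈ Finset.Icc (b + 1) (nums.length - 2), qcnt nums a b c from by
      rw [e2]; simp]
    have e3 : ∀ b ∈ Finset.range (nums.length - 2),
        ∑ a ∈ Finset.range b, ∑ c ∈ Finset.Icc (b + 1) (nums.length - 2), qcnt nums a b c
        = ∑ c ∈ Finset.Icc (b + 1) (nums.length - 2), ∑ a ∈ Finset.range b, qcnt nums a b c := by
      intro b _
      exact Finset.sum_comm
    rw [Finset.sum_congr rfl e3]
    rw [triangle (nums.length - 2) (fun b c => ∑ a ∈ Finset.range b, qcnt nums a b c)]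
    have e4 : nums.length - 2 + 1 = nums.length - 1 := by omega
    rw [e4]
    -- extend the c-range to the full length: the term c = length-1 counts in an empty suffix
    have e5 : nums.length = (nums.length - 1) + 1 := by omega
    rw [e5, Finset.sum_range_succ (fun c => ∑ b ∈ Finset.range c, ∑ a ∈ Finset.range b, qcnt nums a b c)]
    have etop : ∑ b ∈ Finset.range (nums.length - 1), ∑ a ∈ Finset.range b,
        qcnt nums a b (nums.length - 1) = 0 := by
      apply Finset.sum_eq_zero; intro b _
      apply Finset.sum_eq_zero; intro a _
      unfold qcnt
      have hd : nums.length - 1 + 1 = nums.length := by omega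
      rw [hd, List.drop_length]
      simp
    rw [etop]
    simp
  · have hA : nums.length - 3 = 0 := by omega
    rw [hA]
    have h01 : nums.length = 0 ∨ nums.length = 1 ∨ nums.length = 2 := by omega
    simp only [Finset.range_zero, Finset.sum_empty, zero_add]
    rcases h01 with h | h | h <;> rw [h] <;>
      simp [Finset.sum_range_succ]
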